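-- pv_equiv track=rewrite | github.com/bgabrovsek/classification_bonded_knots | knotpy/algorithms/naming.py | _alpha_to_number
-- ===== SOURCE A (Python) =====
-- import string
--
-- _BASE = len(string.ascii_letters)
--
-- _REVERSE = {ch: i for i, ch in enumerate(string.ascii_letters)}
--
-- def _is_alpha(s) -> bool:
--     """Return True iff `s` is an ASCII alphabetic string."""
--     return isinstance(s, str) and s.isascii() and s.isalpha()
--
-- def _alpha_to_number(s: str) -> int:
--     """Convert an ASCII alphabetic string to its sequence number (a=0, b=1, ..., Z=51, aa=52, ...)."""
--     if not _is_alpha(s):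
--         raise ValueError(f"Invalid alphabetic name: {s!r}")
--
--     idx = 0
--     for ch in s:
--         idx = idx * _BASE + _REVERSE[ch]
--
--     offset = sum(_BASE**i for i in range(1, len(s))) if len(s) > 1 else 0
--     return idx + offset
-- ===== SOURCE B (Python) =====
-- import string
--
-- _BASE = len(string.ascii_letters)
--
-- _REVERSE = {ch: i for i, ch in enumerate(string.ascii_letters)}
--
-- def _is_alpha(s) -> bool:
--     """Return True iff `s` is an ASCII alphabetic string."""
--     return isinstance(s, str) and s.isascii() and s.isalpha()
--
-- def _alpha_to_number(s: str) -> int: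
--     """Single-pass bijective base-52 conversion: digits are shifted by +1 so the
--     geometric-sum offset is folded into the accumulator; final -1 restores a=0."""
--     if not _is_alpha(s):
--         raise ValueError(f"Invalid alphabetic name: {s!r}")
--     num = 0
--     for ch in s:
--         num = num * _BASE + _REVERSE[ch] + 1
--     return num - 1
-- ===== Notes on version B (the rewrite author's own statement) =====
-- stated objective: simpler
-- what changed: Replaces A's two-pass scheme (a plain base-52 digit fold plus a separately summed geometric-series offset) with a single bijective-base-52 accumulator pass using digits shifted by +1 and a final -1, eliminating the offset sum.
import Mathlib
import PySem

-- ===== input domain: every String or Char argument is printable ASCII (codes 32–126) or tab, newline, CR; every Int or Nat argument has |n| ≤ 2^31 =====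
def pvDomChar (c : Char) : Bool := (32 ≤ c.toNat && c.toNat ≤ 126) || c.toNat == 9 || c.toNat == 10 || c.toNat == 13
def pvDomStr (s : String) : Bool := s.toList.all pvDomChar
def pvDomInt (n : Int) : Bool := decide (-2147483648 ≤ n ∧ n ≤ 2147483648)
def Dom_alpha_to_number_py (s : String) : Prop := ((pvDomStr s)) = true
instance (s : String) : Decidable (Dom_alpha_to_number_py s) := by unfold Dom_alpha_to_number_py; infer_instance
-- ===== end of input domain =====

-- B replaces A's two passes (digit fold + geometric-sum offset) with one shifted-digit
-- accumulator pass; same return value on every ASCII-alphabetic input (Pre_).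

-- _REVERSE[ch] for an ASCII letter: index in string.ascii_letters ('a'..'z' = 0..25, 'A'..'Z' = 26..51)
def pvRev (c : Char) : Int :=
  if 97 ≤ c.toNat then (c.toNat : Int) - 97 else (c.toNat : Int) - 65 + 26

-- ===== PORT A =====
def alpha_to_number_py (s : String) : Int :=
  -- (the Python raises ValueError on non-alphabetic s; Pre_ excludes exactly those inputs)
  let idx := s.toList.foldl (fun acc c => acc * 52 + pvRev c) 0
  let offset :=
    if PySem.Str.len s > 1 then
      ((PySem.List.pyRange 1 (PySem.Str.len s) 1).map (fun i => (52:Int) ^ i.toNat)).sum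
    else 0
  idx + offset

-- ===== PORT B =====
def alpha_to_number_py_alt (s : String) : Int :=
  (s.toList.foldl (fun acc c => acc * 52 + (pvRev c + 1)) 0) - 1

-- ===== PRECONDITION & SPEC =====
-- Pre_: exactly the inputs where the Python A returns (non-empty ASCII-alphabetic string); elsewhere it raises ValueError.
def Pre_alpha_to_number_py (s : String) : Prop := PySem.Str.strIsalpha s = true
instance (s : String) : Decidable (Pre_alpha_to_number_py s) := by unfold Pre_alpha_to_number_py; infer_instance
def pvWitness_alpha_to_number_py : String := "aZ"

def Spec_alpha_to_number_py (s : String) (out : Int) : Prop := out = alpha_to_number_py_alt s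
instance (s : String) (out : Int) : Decidable (Spec_alpha_to_number_py s out) := by unfold Spec_alpha_to_number_py; infer_instance

-- ===== CLAIM (what is proved, stated in full; the proofs are below) =====
def Claim_equal_alpha_to_number_py : Prop := ∀ (s : String), Dom_alpha_to_number_py s → Pre_alpha_to_number_py s → Spec_alpha_to_number_py s (alpha_to_number_py s)

-- ===== LEMMAS AND PROOFS =====

-- geometric sum ∑_{i<n} 52^i
def pvG (n : Nat) : Int := ((List.range n).map (fun i => (52:Int) ^ i)).sum

-- shifting A's accumulator by k shifts the result by k * 52^len
lemma foldA_shift (cs : List Char) (a k : Int) :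
    cs.foldl (fun acc c => acc * 52 + pvRev c) (a + k)
      = cs.foldl (fun acc c => acc * 52 + pvRev c) a + k * 52 ^ cs.length := by
  induction cs generalizing a k with
  | nil => simp
  | cons c cs ih =>
    simp only [List.foldl_cons, List.length_cons]
    have : (a + k) * 52 + pvRev c = (a * 52 + pvRev c) + k * 52 := by ring
    rw [this, ih]
    ring

-- B's fold equals A's fold plus the full geometric sum
lemma foldB_eq_foldA (cs : List Char) (a : Int) :
    cs.foldl (fun acc c => acc * 52 + (pvRev c + 1)) a
      = cs.foldl (fun acc c => acc * 52 + pvRev c) a + pvG cs.length := by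
  induction cs generalizing a with
  | nil => simp [pvG]
  | cons c cs ih =>
    simp only [List.foldl_cons, List.length_cons]
    have h1 : a * 52 + (pvRev c + 1) = (a * 52 + pvRev c) + 1 := by ring
    rw [h1, ih, foldA_shift]
    simp [pvG, List.range_succ]
    ring

-- A's offset (sum over range(1, n)) is the geometric sum minus its i = 0 term
lemma offset_eq (n : Nat) (hn : 1 ≤ n) :
    ((PySem.List.pyRange 1 (n : Int) 1).map (fun i => (52:Int) ^ i.toNat)).sum = pvG n - 1 := by
  induction n with
  | zero => omega
  | succ m ih =>
    by_cases hm : 1 ≤ m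
    · have hsplit : PySem.List.pyRange 1 ((m:Int)+1) 1 = PySem.List.pyRange 1 (m:Int) 1 ++ [(m:Int)] :=
        PySem.List.pyRange_one_succ_right (by exact_mod_cast hm)
      push_cast
      rw [hsplit, List.map_append, List.sum_append, ih hm]
      simp [pvG, List.range_succ]
      ring
    · interval_cases m
      simp [pvG, PySem.List.pyRange_one_eq_nil, List.range_succ]

-- ===== VERDICT (by name: the statement is the Claim_ definition above) =====
theorem alpha_to_number_py_spec : Claim_equal_alpha_to_number_py := by
  intro s _ hpre
  unfold Spec_alpha_to_number_py alpha_to_number_py alpha_to_number_py_alt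
  have hne : s.toList ≠ [] := by
    unfold Pre_alpha_to_number_py at hpre
    simp [PySem.Str.strIsalpha, PySem.Chars.strIsalpha] at hpre
    simpa [List.isEmpty_iff] using hpre.1
  have hlen : 1 ≤ s.toList.length := List.length_pos_of_ne_nil hne
  rw [foldB_eq_foldA]
  have hlens : PySem.Str.len s = (s.toList.length : Int) := by simp [PySem.Str.len_eq]
  by_cases h : PySem.Str.len s > 1
  · have h' : 1 ≤ s.toList.length := hlen
    rw [if_pos h, hlens, offset_eq s.toList.length h']
    ring
  · have h1 : s.toList.length = 1 := by rw [hlens] at h; omega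
    rw [if_neg h, h1]
    simp [pvG]
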